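-- pv_equiv track=rewrite | github.com/LennartElbe/codeEvo | StudentProblem/10.21.11.34/6/1569572126.py | fil
-- ===== SOURCE A (Python) =====
-- def fil(x:int,ls)->list:
--     result=[]
--     for i in ls:
--         if i<=x:
--             result+=[i]
--         else:
--             return None
--     return result
-- ===== SOURCE B (Python) =====
-- def fil(x: int, ls) -> list:
--     lst = list(ls)
--     if lst and max(lst) > x:
--         return None
--     return lst
-- ===== Notes on version B (the rewrite author's own statement) =====
-- stated objective: alternative
-- what changed: B materializes the input and reduces it to its maximum with the built-in max(), returning None iff that single maximum exceeds x, instead of A's incremental accumulator loop that appends element by element and early-returns None at the first offender.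
import Mathlib
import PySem

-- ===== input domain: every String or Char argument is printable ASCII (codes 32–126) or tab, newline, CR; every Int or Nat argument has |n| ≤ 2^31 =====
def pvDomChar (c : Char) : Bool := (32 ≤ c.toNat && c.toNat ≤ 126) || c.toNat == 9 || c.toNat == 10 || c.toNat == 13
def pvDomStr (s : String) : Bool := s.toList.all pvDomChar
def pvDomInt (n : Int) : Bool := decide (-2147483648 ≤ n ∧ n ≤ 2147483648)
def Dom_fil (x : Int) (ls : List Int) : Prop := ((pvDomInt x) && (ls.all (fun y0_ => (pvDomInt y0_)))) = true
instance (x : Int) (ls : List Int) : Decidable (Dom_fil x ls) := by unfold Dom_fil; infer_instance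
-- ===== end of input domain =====

-- B reduces the list to its maximum via max() and compares once with x, instead of A's append-and-early-return accumulator loop (alternative decomposition; no speed claimed).


-- ===== PORT A =====
-- loop of A: accumulator result, append or early-return None
def filLoop (x : Int) : List Int → List Int → Option (List Int)
  | result, [] => some result
  | result, i :: rest => if i ≤ x then filLoop x (result ++ [i]) rest else none

def fil (x : Int) (ls : List Int) : Option (List Int) := filLoop x [] ls

-- ===== PORT B =====
-- B: lst = list(ls); if lst and max(lst) > x: return None; return lst
def fil_alt (x : Int) (ls : List Int) : Option (List Int) :=
  match PySem.List.max? ls (fun y => y) with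
  | none => some ls
  | some m => if m > x then none else some ls

-- ===== PRECONDITION & SPEC =====
def Spec_fil (x : Int) (ls : List Int) (out : Option (List Int)) : Prop := out = fil_alt x ls
instance (x : Int) (ls : List Int) (out : Option (List Int)) : Decidable (Spec_fil x ls out) := by unfold Spec_fil; infer_instance

-- ===== CLAIM =====
def Claim_equal_fil : Prop := ∀ (x : Int) (ls : List Int), Dom_fil x ls → Spec_fil x ls (fil x ls)

-- ===== LEMMAS AND PROOFS =====
theorem filLoop_eq (x : Int) (ls : List Int) : ∀ acc,
    filLoop x acc ls = if ls.all (fun i => decide (i ≤ x)) then some (acc ++ ls) else none := by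
  induction ls with
  | nil => intro acc; simp [filLoop]
  | cons i rest ih =>
    intro acc
    simp only [filLoop, List.all_cons]
    by_cases h : i ≤ x
    · simp [h, ih, List.append_assoc]
    · simp [h]

theorem fil_alt_eq (x : Int) (ls : List Int) :
    fil_alt x ls = if ls.all (fun i => decide (i ≤ x)) then some ls else none := by
  unfold fil_alt
  cases hm : PySem.List.max? ls (fun y => y) with
  | none =>
    have : ls = [] := (PySem.List.max?_eq_none_iff ls _).mp hm
    subst this; simp
  | some m =>
    have hmem : m ∈ ls := PySem.List.max?_mem hm
    have hmax : ∀ y ∈ ls, y ≤ m := fun y hy => PySem.List.max?_isMax hm y hy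
    by_cases h : m > x
    · have : ¬ ls.all (fun i => decide (i ≤ x)) = true := by
        simp only [List.all_eq_true]
        intro hall
        have := hall m hmem
        simp at this; omega
      simp [h, this]
    · have : ls.all (fun i => decide (i ≤ x)) = true := by
        simp only [List.all_eq_true]
        intro y hy
        have := hmax y hy
        simp; omega
      simp [h, this]

-- ===== VERDICT =====
theorem fil_spec : Claim_equal_fil := by
  intro x ls _
  unfold Spec_fil fil
  rw [fil_alt_eq, filLoop_eq]
  simp
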